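-- pv_equiv track=rewrite | github.com/igorvanloo/Project-Euler-Explained | Finished Problems/pe00518 - Prime Triples and geometric sequences.py | compute1
-- ===== SOURCE A (Python) =====
-- import time, math, eulerlib, itertools
--
-- def is_prime(x): #Test if giving value is a prime
-- 	if x <= 1:
-- 		return False
-- 	elif x <= 3:
-- 		return True
-- 	elif x % 2 == 0:
-- 		return False
-- 	else:
-- 		for i in range(3, int(math.sqrt(x)) + 1, 2):
-- 			if x % i == 0:
-- 				return False
-- 		return True
--
-- def compute1(limit):
--     #(a+1) = x * y * y,
--     #(b+1) = r * (a+1) = z * x * y,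
--     #(c+1) = r * (b+1) = z * z * x
--     total = 0
--     #We first find the possible x values. Notice that c + 1 = xzz <= limit, which implies that (a+1) = xyy <= limit
--     #Because z > y > 0, we know y >= 1 => z >= 2 => c + 1 > 4x <= limit
--     for x in range(1, limit//4 + 1):
--         #Now we want to find y, we know that a + 1 = xyy, so we can begin to find all candidate values of y
--         # with a simple if a >= limit break
--         for y in range(1,int(math.sqrt((limit - 1)/x)) + 1):
--             a = x * y * y - 1
--             if a >= limit:
--                 break
--             #now we want to find z, we know that gcd(y,z) == 1 and z > y > 0, so we can simply check these conditions,
--             #check if c = xzz - 1 goes over the limit and finally check if our triple is valid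
--             if is_prime(a) == True:
--                 for z in range(y+1, int(math.sqrt((limit - 1)/x)) + 1):
--                     if math.gcd(y, z) == 1:
--                         c = x * z * z - 1
--                         if c >= limit:
--                             break
--                         if is_prime(c) == True:
--                             b = x * y * z - 1
--                             if is_prime(b) == True:
--                                 total += (a+b+c)
--     return total
-- ===== SOURCE B (Python) =====
-- import math
--
-- def compute1(limit):
--     # Same sum of prime geometric triples, but primality comes from one
--     # Eratosthenes sieve (O(1) lookups) instead of trial division, the loop
--     # nesting is z-outer/y-inner, and bounds use exact integer isqrt.
--     if limit < 4:
--         return 0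
--     sieve = bytearray([1]) * limit          # sieve[n] == 1  <=>  n is prime
--     sieve[0] = sieve[1] = 0
--     for p in range(2, math.isqrt(limit - 1) + 1):
--         sieve[p * p::p] = b'\x00' * len(sieve[p * p::p])
--     total = 0
--     for x in range(1, limit // 4 + 1):
--         m = math.isqrt((limit - 1) // x)
--         for z in range(2, m + 1):
--             if sieve[x * z * z - 1]:
--                 for y in range(1, z):
--                     if math.gcd(y, z) == 1 and sieve[x * y * y - 1] and sieve[x * y * z - 1]:
--                         total += x * (y * y + y * z + z * z) - 3
--     return total
-- ===== Notes on version B (the rewrite author's own statement) =====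
-- stated objective: faster
-- what changed: Replaces per-candidate trial-division primality (and float sqrt bounds) with one precomputed Eratosthenes sieve for O(1) primality lookups, swaps the y/z loop nesting to z-outer/y-inner so the cheap c-primality test prunes first, and uses exact integer isqrt bounds with no break checks.
import Mathlib
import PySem

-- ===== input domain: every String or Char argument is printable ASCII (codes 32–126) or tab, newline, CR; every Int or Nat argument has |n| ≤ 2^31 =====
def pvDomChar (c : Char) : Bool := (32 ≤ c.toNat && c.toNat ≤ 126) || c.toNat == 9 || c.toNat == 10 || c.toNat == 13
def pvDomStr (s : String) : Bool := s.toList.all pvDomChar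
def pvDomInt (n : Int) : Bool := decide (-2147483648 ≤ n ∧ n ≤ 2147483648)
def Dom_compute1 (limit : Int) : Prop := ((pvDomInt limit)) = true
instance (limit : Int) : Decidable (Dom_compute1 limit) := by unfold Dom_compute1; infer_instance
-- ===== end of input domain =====

-- B replaces A's per-candidate trial-division primality test with one Eratosthenes
-- sieve and a z-outer/y-inner traversal: measurably faster, same value.

-- ===== PORT A =====
-- int(math.sqrt(v)) for an integer 0 ≤ v ≤ 2^31 is exactly Nat.sqrt v: the two
-- correctly-rounded float steps err by < 2^-35, smaller than the distance from
-- sqrt(v) to any other integer at these magnitudes.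
def pvIsqrt (v : Int) : Int := (Nat.sqrt v.toNat : Int)

-- is_prime: trial division by odd i in range(3, int(sqrt(x))+1, 2); the loop's
-- early `return False` on a divisor is exactly List.all of "no divisor".
def is_prime (x : Int) : Bool :=
  if x ≤ 1 then false
  else if x ≤ 3 then true
  else if PySem.Int.mod x 2 == 0 then false
  else (PySem.List.pyRange 3 (pvIsqrt x + 1) 2).all (fun i => PySem.Int.mod x i != 0)

-- int(math.sqrt((limit-1)/x)): float-exact (same error bound) = isqrt((limit-1)//x)
def pvYmax (limit x : Int) : Int := (Nat.sqrt (PySem.Int.floordiv (limit - 1) x).toNat : Int)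

-- inner `for z in range(y+1, ...)` with its two breaks
def zLoopA (limit x y a : Int) : List Int → Int → Int
  | [], total => total
  | z :: zs, total =>
    if Int.gcd y z == 1 then
      let c := x * z * z - 1
      if limit ≤ c then total
      else if is_prime c then
        let b := x * y * z - 1
        if is_prime b then zLoopA limit x y a zs (total + (a + b + c))
        else zLoopA limit x y a zs total
      else zLoopA limit x y a zs total
    else zLoopA limit x y a zs total

-- `for y in range(1, ...)` with its break
def yLoopA (limit x : Int) : List Int → Int → Int
  | [], total => total
  | y :: ys, total =>
    let a := x * y * y - 1
    if limit ≤ a then total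
    else if is_prime a then
      yLoopA limit x ys (zLoopA limit x y a (PySem.List.pyRange (y + 1) (pvYmax limit x + 1) 1) total)
    else yLoopA limit x ys total

def compute1 (limit : Int) : Int :=
  (PySem.List.pyRange 1 (PySem.Int.floordiv limit 4 + 1) 1).foldl
    (fun total x => yLoopA limit x (PySem.List.pyRange 1 (pvYmax limit x + 1) 1) total) 0

-- ===== PORT B =====
-- sieve[i*p::p] = zeros  (slice assignment of Source B, index by index)
def markB (s : Array Bool) (p i : Nat) : Array Bool :=
  if h : 0 < p ∧ i < s.size then markB (s.set i false h.2) p (i + p) else s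
termination_by s.size - i
decreasing_by simp [Array.size_set]; omega

-- `for p in range(2, isqrt(limit-1)+1)`
def sieveLoopB (s : Array Bool) (p stop : Nat) : Array Bool :=
  if p ≤ stop then sieveLoopB (markB s p (p * p)) (p + 1) stop else s
termination_by stop + 1 - p

-- bytearray sieve: all ones, zero out 0 and 1, then cross off multiples
def sieveB (n : Nat) : Array Bool :=
  sieveLoopB (((Array.replicate n true).setIfInBounds 0 false).setIfInBounds 1 false) 2 (Nat.sqrt (n - 1))

def compute1_alt (limit : Int) : Int :=
  if limit < 4 then 0
  else
    let n := limit.toNat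
    let s := sieveB n
    ((List.range' 1 (n / 4)).foldl (fun t x =>
        let m := Nat.sqrt ((n - 1) / x)
        (List.range' 2 (m - 1)).foldl (fun t z =>
            if s.getD (x * z * z - 1) false then
              (List.range' 1 (z - 1)).foldl (fun t y =>
                  if Nat.gcd y z = 1 && s.getD (x * y * y - 1) false && s.getD (x * y * z - 1) false
                  then t + (x * (y * y + y * z + z * z) - 3) else t) t
            else t) t) 0 : Nat)

-- ===== PRECONDITION & SPEC =====
def Spec_compute1 (limit : Int) (out : Int) : Prop := out = compute1_alt limit
instance (limit : Int) (out : Int) : Decidable (Spec_compute1 limit out) := by unfold Spec_compute1; infer_instance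

-- ===== CLAIM (what is proved, stated in full; the proofs are below) =====
def Claim_equal_compute1 : Prop := ∀ (limit : Int), Dom_compute1 limit → Spec_compute1 limit (compute1 limit)

-- ===== LEMMAS AND PROOFS =====

-- the contribution of one candidate triple (x, y, z), 1 ≤ y < z
def gC (x z y : Nat) : Nat :=
  if Nat.gcd y z = 1 ∧ Nat.Prime (x * y * y - 1) ∧ Nat.Prime (x * y * z - 1) ∧ Nat.Prime (x * z * z - 1)
  then x * (y * y + y * z + z * z) - 3 else 0

-- -- generic fold shapes --
theorem pv_foldl_eq_add_sum_int {β : Type} (l : List β) (f : Int → β → Int) (g : β → Int)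
    (h : ∀ t x, x ∈ l → f t x = t + g x) (t0 : Int) :
    l.foldl f t0 = t0 + (l.map g).sum := by
  induction l generalizing t0 with
  | nil => simp
  | cons x xs ih =>
    rw [List.foldl_cons, h t0 x (by simp), ih (fun t y hy => h t y (List.mem_cons_of_mem _ hy))]
    simp only [List.map_cons, List.sum_cons]; ring

theorem pv_foldl_eq_add_sum_nat {β : Type} (l : List β) (f : Nat → β → Nat) (g : β → Nat)
    (h : ∀ t x, x ∈ l → f t x = t + g x) (t0 : Nat) :
    l.foldl f t0 = t0 + (l.map g).sum := by
  induction l generalizing t0 with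
  | nil => simp
  | cons x xs ih =>
    rw [List.foldl_cons, h t0 x (by simp), ih (fun t y hy => h t y (List.mem_cons_of_mem _ hy))]
    simp only [List.map_cons, List.sum_cons]; ring

theorem pv_sum_range' (a n : Nat) (f : Nat → Nat) :
    ((List.range' a n).map f).sum = ∑ i ∈ Finset.Ico a (a + n), f i := by
  rw [Finset.sum_Ico_eq_sum_range, List.range'_eq_map_range, List.map_map,
    show a + n - a = n from by omega]
  rfl

theorem pv_pyRange_cast (a b : Nat) :
    PySem.List.pyRange (a : Int) (b : Int) 1 = (List.range' a (b - a)).map (fun k : Nat => (k : Int)) := by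
  apply List.ext_getElem
  · simp [PySem.List.length_pyRange_one]
  · intro k h1 h2
    rw [PySem.List.getElem_pyRange_one, List.getElem_map, List.getElem_range']
    push_cast
    ring

-- -- trial division is primality --
theorem pv_isPrime_eq (m : Nat) : is_prime (m : Int) = decide (Nat.Prime m) := by
  unfold is_prime
  by_cases h1 : (m : Int) ≤ 1
  · rw [if_pos h1]
    have : ¬ Nat.Prime m := by intro hp; have := hp.two_le; omega
    simp [this]
  · rw [if_neg h1]
    by_cases h3 : (m : Int) ≤ 3
    · rw [if_pos h3]
      have hm : m = 2 ∨ m = 3 := by omega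
      rcases hm with rfl | rfl <;> simp [Nat.prime_two, Nat.prime_three]
    · rw [if_neg h3]
      have hm4 : 4 ≤ m := by omega
      have hmod : PySem.Int.mod (m : Int) 2 = ((m % 2 : Nat) : Int) := by
        exact_mod_cast PySem.Int.mod_natCast m 2
      by_cases h2 : m % 2 = 0
      · rw [if_pos (by simp; exact_mod_cast Nat.dvd_of_mod_eq_zero h2)]
        have : ¬ Nat.Prime m := by
          intro hp
          rcases hp.eq_one_or_self_of_dvd 2 (Nat.dvd_of_mod_eq_zero h2) with h | h <;> omega
        simp [this]
      · rw [if_neg (by simp; omega)]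
        have hsq : pvIsqrt (m : Int) = (Nat.sqrt m : Int) := by simp [pvIsqrt]
        rw [hsq, Bool.eq_iff_iff]
        simp only [List.all_eq_true, decide_eq_true_eq]
        constructor
        · intro hall
          by_contra hnp
          have hq := Nat.minFac_prime (show m ≠ 1 by omega)
          have hqd := Nat.minFac_dvd m
          have hqs : m.minFac * m.minFac ≤ m := by
            have h := Nat.minFac_sq_le_self (show 0 < m by omega) hnp
            rw [pow_two] at h; exact h
          have hq2 : m.minFac ≠ 2 := by
            intro h; rw [h] at hqd
            exact h2 (Nat.eq_zero_of_dvd_of_lt hqd |> fun _ => Nat.mod_eq_zero_of_dvd hqd)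
          have hq3 : 3 ≤ m.minFac := by have := hq.two_le; omega
          have hodd : m.minFac % 2 = 1 := by
            rcases hq.eq_two_or_odd with h | h
            · exact absurd h hq2
            · exact h
          have hle : m.minFac ≤ Nat.sqrt m := Nat.le_sqrt.mpr hqs
          have hmem : (m.minFac : Int) ∈ PySem.List.pyRange 3 ((Nat.sqrt m : Int) + 1) 2 := by
            rw [PySem.List.mem_pyRange_iff_of_pos (by norm_num)]
            refine ⟨by exact_mod_cast hq3, by omega, by omega⟩
          have hb := hall _ hmem
          rw [bne_iff_ne] at hb
          apply hb
          rw [PySem.Int.mod_eq_zero_iff_dvd]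
          exact_mod_cast hqd
        · intro hp i hi
          rw [PySem.List.mem_pyRange_iff_of_pos (by norm_num)] at hi
          obtain ⟨hi3, hilt, _⟩ := hi
          rw [bne_iff_ne]
          intro h0
          rw [PySem.Int.mod_eq_zero_iff_dvd] at h0
          obtain ⟨k, rfl⟩ : ∃ k : Nat, (k : Int) = i := ⟨i.toNat, Int.toNat_of_nonneg (by omega)⟩
          rw [Int.natCast_dvd_natCast] at h0
          have hs : Nat.sqrt m < m := Nat.sqrt_lt_self (by omega)
          rcases hp.eq_one_or_self_of_dvd k h0 with h | h <;> omega

-- -- sieve is primality --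
theorem pv_markB_size (s : Array Bool) (p i : Nat) : (markB s p i).size = s.size := by
  fun_induction markB <;> simp_all [Array.size_set]

theorem pv_setGetD (s : Array Bool) (i : Nat) (h : i < s.size) (j : Nat) :
    (s.set i false h).getD j false = if i = j then false else s.getD j false := by
  by_cases hj : j < s.size
  · simp [Array.getD, Array.size_set, hj, Array.getElem_set]
  · simp [Array.getD, Array.size_set, hj]

theorem pv_markB_getD (s : Array Bool) (p i j : Nat) (hp : 0 < p) :
    (markB s p i).getD j false =
      if i ≤ j ∧ p ∣ j - i ∧ j < s.size then false else s.getD j false := by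
  fun_induction markB with
  | case1 s i h ih =>
    rw [ih, pv_setGetD, Array.size_set]
    by_cases hjs : j < s.size
    · by_cases hij : j = i
      · subst hij
        rw [if_neg (by rintro ⟨h1, -, -⟩; omega), if_pos rfl,
          if_pos ⟨Nat.le_refl j, by simp, hjs⟩]
      · have hAB : (i + p ≤ j ∧ p ∣ j - (i + p) ∧ j < s.size) ↔ (i ≤ j ∧ p ∣ j - i ∧ j < s.size) := by
          constructor
          · rintro ⟨hle, ⟨k, hk⟩, hs⟩
            exact ⟨by omega, ⟨k + 1, by rw [Nat.mul_succ]; omega⟩, hs⟩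
          · rintro ⟨hle, ⟨k, hk⟩, hs⟩
            have hk1 : 1 ≤ k := by
              rcases Nat.eq_zero_or_pos k with rfl | hpos
              · omega
              · exact hpos
            have hpk : p * 1 ≤ p * k := Nat.mul_le_mul_left p hk1
            refine ⟨by omega, ⟨k - 1, by rw [Nat.mul_sub, Nat.mul_one]; omega⟩, hs⟩
        rw [if_congr hAB rfl rfl, if_neg (show ¬ i = j from fun h => hij h.symm)]
    · have hn1 : ¬ (i + p ≤ j ∧ p ∣ j - (i + p) ∧ j < s.size) := by rintro ⟨-, -, h3⟩; omega
      have hn2 : ¬ (i ≤ j ∧ p ∣ j - i ∧ j < s.size) := by rintro ⟨-, -, h3⟩; omega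
      have hn3 : ¬ i = j := by omega
      rw [if_neg hn1, if_neg hn3, if_neg hn2]
  | case2 s i h =>
    rw [if_neg (by rintro ⟨h1, -, h3⟩; omega)]

theorem pv_sieveLoopB_getD (s : Array Bool) (p stop j : Nat) (hp : 0 < p) (hj : j < s.size) :
    ((sieveLoopB s p stop).getD j false = true ↔
      s.getD j false = true ∧ ∀ q, p ≤ q → q ≤ stop → q * q ≤ j → ¬ q ∣ j) := by
  suffices H : ∀ nfuel (s : Array Bool) (p : Nat), 0 < p → j < s.size → stop + 1 - p = nfuel →
      ((sieveLoopB s p stop).getD j false = true ↔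
        s.getD j false = true ∧ ∀ q, p ≤ q → q ≤ stop → q * q ≤ j → ¬ q ∣ j) by
    exact H _ s p hp hj rfl
  intro nfuel
  induction nfuel with
  | zero =>
    intro s p hp hj hn
    rw [sieveLoopB, if_neg (by omega)]
    exact ⟨fun h => ⟨h, fun q hq1 hq2 _ => by omega⟩, fun h => h.1⟩
  | succ nf ih =>
    intro s p hp hj hn
    by_cases hps : p ≤ stop
    · rw [sieveLoopB, if_pos hps,
        ih (markB s p (p * p)) (p + 1) (by omega) (by rw [pv_markB_size]; exact hj) (by omega),
        pv_markB_getD s p (p * p) j hp]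
      have hmark : (p * p ≤ j ∧ p ∣ j - p * p ∧ j < s.size) ↔ (p * p ≤ j ∧ p ∣ j) := by
        constructor
        · rintro ⟨h1, h2, -⟩
          refine ⟨h1, ?_⟩
          have := Nat.dvd_add h2 (Dvd.intro p rfl)
          rwa [Nat.sub_add_cancel h1] at this
        · rintro ⟨h1, h2⟩
          exact ⟨h1, Nat.dvd_sub h2 (Dvd.intro p rfl), hj⟩
      constructor
      · rintro ⟨hmk, hrest⟩
        have hcond : ¬ (p * p ≤ j ∧ p ∣ j - p * p ∧ j < s.size) := by
          intro hc
          rw [if_pos hc] at hmk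
          exact Bool.false_ne_true hmk
        rw [if_neg hcond] at hmk
        refine ⟨hmk, fun q hq1 hq2 hq3 hq4 => ?_⟩
        rcases Nat.eq_or_lt_of_le hq1 with rfl | hlt
        · exact hcond (hmark.mpr ⟨hq3, hq4⟩)
        · exact hrest q hlt hq2 hq3 hq4
      · rintro ⟨hs, hall⟩
        have hcond : ¬ (p * p ≤ j ∧ p ∣ j - p * p ∧ j < s.size) := by
          intro hc
          exact hall p (Nat.le_refl p) hps (hmark.mp hc).1 (hmark.mp hc).2
        rw [if_neg hcond]
        exact ⟨hs, fun q hq1 hq2 hq3 hq4 => hall q (by omega) hq2 hq3 hq4⟩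
    · rw [sieveLoopB, if_neg hps]
      exact ⟨fun h => ⟨h, fun q hq1 hq2 _ => by omega⟩, fun h => h.1⟩

theorem pv_sieve_getD (n k : Nat) (hn : 4 ≤ n) (hk : k < n) :
    (sieveB n).getD k false = decide (Nat.Prime k) := by
  have hsize : (((Array.replicate n true).setIfInBounds 0 false).setIfInBounds 1 false).size = n := by
    simp
  have hk' : k < (((Array.replicate n true).setIfInBounds 0 false).setIfInBounds 1 false).size := by
    rw [hsize]; exact hk
  have hinit : (((Array.replicate n true).setIfInBounds 0 false).setIfInBounds 1 false).getD k false
      = decide (2 ≤ k) := by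
    simp only [Array.getD, hk', dif_pos]
    by_cases h0 : k = 0
    · subst h0; simp [hk]
    · by_cases h1 : k = 1
      · subst h1; simp
      · simp [hk, show ¬ (1 = k) from by omega,
          show ¬ (0 = k) from by omega, show 2 ≤ k from by omega]
  unfold sieveB
  rw [Bool.eq_iff_iff, decide_eq_true_eq,
    pv_sieveLoopB_getD _ 2 (Nat.sqrt (n - 1)) k (by norm_num) hk', hinit]
  simp only [decide_eq_true_eq]
  constructor
  · rintro ⟨hk2, hall⟩
    by_contra hnp
    have hq := Nat.minFac_prime (show k ≠ 1 by omega)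
    have hqd := Nat.minFac_dvd k
    have hqs : k.minFac * k.minFac ≤ k := by
      have h := Nat.minFac_sq_le_self (by omega) hnp
      rw [pow_two] at h; exact h
    exact hall k.minFac hq.two_le (Nat.le_sqrt.mpr (by omega)) hqs hqd
  · intro hpk
    refine ⟨hpk.two_le, fun q hq2 hqs hqq hdvd => ?_⟩
    rcases hpk.eq_one_or_self_of_dvd q hdvd with h | h
    · omega
    · subst h
      have h2 : 2 * q ≤ q * q := Nat.mul_le_mul_right q hq2
      omega

-- cast of a Nat sum of mapped values
theorem pv_cast_sum (l : List Nat) (f : Nat → Nat) :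
    ((l.map (fun y => ((f y : Nat) : Int))).sum) = (((l.map f).sum : Nat) : Int) := by
  induction l with
  | nil => simp
  | cons a l ih => simp [ih]

-- int(math.sqrt((limit-1)/x)) = Nat.sqrt ((n-1)/x) when limit = n ≥ 4
theorem pv_pvYmax (n x : Nat) (hn : 4 ≤ n) :
    pvYmax (n : Int) (x : Int) = ((Nat.sqrt ((n - 1) / x) : Nat) : Int) := by
  unfold pvYmax
  rw [show (n : Int) - 1 = ((n - 1 : Nat) : Int) from by omega,
    PySem.Int.floordiv_natCast (n - 1) x, Int.toNat_natCast]

-- -- per-x sums --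
theorem pv_zLoopA_sum (n x y : Nat) (l : List Nat) (hx : 0 < x) (hy : 0 < y)
    (hpa : Nat.Prime (x * y * y - 1))
    (hl : ∀ z ∈ l, 0 < z ∧ x * z * z ≤ n - 1) (hn : 4 ≤ n) (t : Int) :
    zLoopA (n : Int) (x : Int) (y : Int) ((x * y * y - 1 : Nat) : Int) (l.map (fun k : Nat => (k : Int))) t
      = t + ((l.map (fun z => (gC x z y : Int))).sum) := by
  revert hl
  induction l generalizing t with
  | nil => intro hl; simp [zLoopA]
  | cons z l ih =>
    intro hl
    obtain ⟨hz, hzn⟩ := hl z (by simp)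
    have ihl : ∀ w ∈ l, 0 < w ∧ x * w * w ≤ n - 1 := fun w hw => hl w (by simp [hw])
    have hxzz : 1 ≤ x * z * z := Nat.one_le_iff_ne_zero.mpr (by positivity)
    have hxyz : 1 ≤ x * y * z := Nat.one_le_iff_ne_zero.mpr (by positivity)
    have hxyy : 1 ≤ x * y * y := Nat.one_le_iff_ne_zero.mpr (by positivity)
    have hc : (x : Int) * z * z - 1 = ((x * z * z - 1 : Nat) : Int) := by
      rw [Nat.cast_sub hxzz]; push_cast; ring
    have hb : (x : Int) * y * z - 1 = ((x * y * z - 1 : Nat) : Int) := by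
      rw [Nat.cast_sub hxyz]; push_cast; ring
    simp only [List.map_cons, zLoopA, List.sum_cons]
    rw [Int.gcd_natCast_natCast]
    by_cases hg : Nat.gcd y z = 1
    · rw [if_pos (by simp [hg]), hc, if_neg (by rw [Nat.cast_le]; omega), pv_isPrime_eq]
      by_cases hpc : Nat.Prime (x * z * z - 1)
      · rw [if_pos (by simp [hpc]), hb, pv_isPrime_eq]
        by_cases hpb : Nat.Prime (x * y * z - 1)
        · rw [if_pos (by simp [hpb]), ih _ ihl]
          have hgc : gC x z y = (x * y * y - 1) + ((x * y * z - 1) + (x * z * z - 1)) := by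
            unfold gC
            rw [if_pos ⟨hg, hpa, hpb, hpc⟩]
            have e : x * (y * y + y * z + z * z) = x * y * y + x * y * z + x * z * z := by ring
            omega
          rw [hgc]
          push_cast
          ring
        · rw [if_neg (by simp [hpb]), ih _ ihl]
          have hgc : gC x z y = 0 := by
            unfold gC; rw [if_neg (by rintro ⟨-, -, h, -⟩; exact hpb h)]
          rw [hgc]; push_cast; ring
      · rw [if_neg (by simp [hpc]), ih _ ihl]
        have hgc : gC x z y = 0 := by
          unfold gC; rw [if_neg (by rintro ⟨-, -, -, h⟩; exact hpc h)]
        rw [hgc]; push_cast; ring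
    · rw [if_neg (by simp [hg]), ih _ ihl]
      have hgc : gC x z y = 0 := by
        unfold gC; rw [if_neg (by rintro ⟨h, -⟩; exact hg h)]
      rw [hgc]; push_cast; ring

theorem pv_yLoopA_sum (n x : Nat) (l : List Nat) (hx : 0 < x)
    (hl : ∀ y ∈ l, 0 < y ∧ y ≤ Nat.sqrt ((n - 1) / x)) (hn : 4 ≤ n) (t : Int) :
    yLoopA (n : Int) (x : Int) (l.map (fun k : Nat => (k : Int))) t
      = t + ((l.map (fun y =>
          ((((List.range' (y + 1) (Nat.sqrt ((n - 1) / x) - y)).map (fun z => gC x z y)).sum : Nat) : Int))).sum) := by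
  revert hl
  induction l generalizing t with
  | nil => intro hl; simp [yLoopA]
  | cons y l ih =>
    intro hl
    obtain ⟨hy, hym⟩ := hl y (by simp)
    have ihl : ∀ w ∈ l, 0 < w ∧ w ≤ Nat.sqrt ((n - 1) / x) := fun w hw => hl w (by simp [hw])
    have hxyy1 : 1 ≤ x * y * y := Nat.one_le_iff_ne_zero.mpr (by positivity)
    have hyy : y * y ≤ (n - 1) / x := Nat.le_sqrt.mp hym
    have ha : x * y * y ≤ n - 1 := by
      have h := (Nat.le_div_iff_mul_le hx).mp hyy
      calc x * y * y = y * y * x := by ring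
        _ ≤ n - 1 := h
    have hacast : (x : Int) * y * y - 1 = ((x * y * y - 1 : Nat) : Int) := by
      rw [Nat.cast_sub hxyy1]; push_cast; ring
    simp only [List.map_cons, yLoopA, List.sum_cons]
    rw [hacast, if_neg (by rw [Nat.cast_le]; omega), pv_isPrime_eq]
    have hzl : ∀ w ∈ List.range' (y + 1) (Nat.sqrt ((n - 1) / x) - y), 0 < w ∧ x * w * w ≤ n - 1 := by
      intro w hw
      rw [List.mem_range'_1] at hw
      have hwm : w ≤ Nat.sqrt ((n - 1) / x) := by omega
      have hww : w * w ≤ (n - 1) / x := Nat.le_sqrt.mp hwm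
      have h := (Nat.le_div_iff_mul_le hx).mp hww
      exact ⟨by omega, by calc x * w * w = w * w * x := by ring
        _ ≤ n - 1 := h⟩
    by_cases hpa : Nat.Prime (x * y * y - 1)
    · rw [if_pos (by simp [hpa]),
        pv_pvYmax n x hn,
        show ((Nat.sqrt ((n - 1) / x) : Nat) : Int) + 1 = ((Nat.sqrt ((n - 1) / x) + 1 : Nat) : Int) from by push_cast; ring,
        show (y : Int) + 1 = ((y + 1 : Nat) : Int) from by push_cast; ring,
        pv_pyRange_cast (y + 1) (Nat.sqrt ((n - 1) / x) + 1),
        show Nat.sqrt ((n - 1) / x) + 1 - (y + 1) = Nat.sqrt ((n - 1) / x) - y from by omega,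
        pv_zLoopA_sum n x y _ hx hy hpa hzl hn t,
        ih _ ihl]
      rw [pv_cast_sum]
      ring
    · rw [if_neg (by simp [hpa]), ih _ ihl]
      have hz0 : ((List.range' (y + 1) (Nat.sqrt ((n - 1) / x) - y)).map (fun z => gC x z y)).sum = 0 := by
        apply List.sum_eq_zero
        intro w hw
        simp only [List.mem_map] at hw
        obtain ⟨zz, -, rfl⟩ := hw
        unfold gC
        rw [if_neg (by rintro ⟨-, h, -, -⟩; exact hpa h)]
      rw [hz0]
      push_cast
      ring

-- -- triangle swap --
theorem pv_swap (m : Nat) (g : Nat → Nat → Nat) :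
    ((List.range' 1 m).map (fun y => ((List.range' (y + 1) (m - y)).map (fun z => g y z)).sum)).sum
      = ((List.range' 2 (m - 1)).map (fun z => ((List.range' 1 (z - 1)).map (fun y => g y z)).sum)).sum := by
  rw [pv_sum_range' 1 m, pv_sum_range' 2 (m - 1)]
  have hL : ∑ y ∈ Finset.Ico 1 (1 + m), ((List.range' (y + 1) (m - y)).map (fun z => g y z)).sum
      = ∑ y ∈ Finset.Ico 1 (m + 1), ∑ z ∈ Finset.Ico (y + 1) (m + 1), g y z := by
    rw [show 1 + m = m + 1 from by omega]
    refine Finset.sum_congr rfl fun y hy => ?_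
    rw [Finset.mem_Ico] at hy
    rw [pv_sum_range' (y + 1) (m - y), show y + 1 + (m - y) = m + 1 from by omega]
  have hR : ∑ z ∈ Finset.Ico 2 (2 + (m - 1)), ((List.range' 1 (z - 1)).map (fun y => g y z)).sum
      = ∑ z ∈ Finset.Ico 2 (m + 1), ∑ y ∈ Finset.Ico 1 z, g y z := by
    rcases Nat.eq_zero_or_pos m with rfl | hm
    · simp
    · rw [show 2 + (m - 1) = m + 1 from by omega]
      refine Finset.sum_congr rfl fun z hz => ?_
      rw [Finset.mem_Ico] at hz
      rw [pv_sum_range' 1 (z - 1), show 1 + (z - 1) = z from by omega]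
  rw [hL, hR, Finset.sum_Ico_Ico_comm' 1 (m + 1) g]
  rcases Nat.eq_zero_or_pos m with rfl | hm
  · simp
  · rw [← Finset.sum_Ico_consecutive (fun z => ∑ y ∈ Finset.Ico 1 z, g y z)
      (show 1 ≤ 2 by omega) (show 2 ≤ m + 1 by omega)]
    simp

-- -- B per-x --
theorem pv_B_perx (n x : Nat) (hx : 0 < x) (hn : 4 ≤ n) (t : Nat) :
    (List.range' 2 (Nat.sqrt ((n - 1) / x) - 1)).foldl (fun t z =>
        if (sieveB n).getD (x * z * z - 1) false then
          (List.range' 1 (z - 1)).foldl (fun t y =>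
              if Nat.gcd y z = 1 && (sieveB n).getD (x * y * y - 1) false && (sieveB n).getD (x * y * z - 1) false
              then t + (x * (y * y + y * z + z * z) - 3) else t) t
        else t) t
      = t + ((List.range' 2 (Nat.sqrt ((n - 1) / x) - 1)).map
          (fun z => ((List.range' 1 (z - 1)).map (fun y => gC x z y)).sum)).sum := by
  apply pv_foldl_eq_add_sum_nat
  intro t' z hz
  rw [List.mem_range'_1] at hz
  have hzm : z ≤ Nat.sqrt ((n - 1) / x) := by omega
  have hzz : z * z ≤ (n - 1) / x := Nat.le_sqrt.mp hzm
  have hxz : x * z * z ≤ n - 1 := by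
    have h := (Nat.le_div_iff_mul_le hx).mp hzz
    calc x * z * z = z * z * x := by ring
      _ ≤ n - 1 := h
  have hxzz1 : 1 ≤ x * z * z := by
    have hz2 : 2 ≤ z := hz.1
    have : 0 < x * z * z := by positivity
    omega
  have hcn : x * z * z - 1 < n := by omega
  rw [pv_sieve_getD n _ hn hcn]
  by_cases hpc : Nat.Prime (x * z * z - 1)
  · rw [if_pos (by simp [hpc])]
    rw [pv_foldl_eq_add_sum_nat _ _ (fun y => gC x z y) ?_ t']
    intro t'' y hyv
    rw [List.mem_range'_1] at hyv
    have hy1 : 1 ≤ y := hyv.1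
    have hyz : y < z := by omega
    have h1 : x * y ≤ x * z := Nat.mul_le_mul_left x (by omega)
    have hA : x * y * y ≤ x * z * z := Nat.mul_le_mul h1 (by omega)
    have hB : x * y * z ≤ x * z * z := Nat.mul_le_mul h1 (Nat.le_refl z)
    have hAn : x * y * y - 1 < n := by omega
    have hBn : x * y * z - 1 < n := by omega
    rw [pv_sieve_getD n _ hn hAn, pv_sieve_getD n _ hn hBn]
    by_cases hg : Nat.gcd y z = 1 <;> by_cases hpA : Nat.Prime (x * y * y - 1) <;>
      by_cases hpB : Nat.Prime (x * y * z - 1) <;>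
      simp [gC, hg, hpA, hpB, hpc]
  · have h0 : ((List.range' 1 (z - 1)).map (fun y => gC x z y)).sum = 0 := by
      apply List.sum_eq_zero
      intro w hw
      simp only [List.mem_map] at hw
      obtain ⟨yy, -, rfl⟩ := hw
      unfold gC
      rw [if_neg (by rintro ⟨-, -, -, h⟩; exact hpc h)]
    rw [if_neg (by simp [hpc]), h0, Nat.add_zero]

-- ===== VERDICT (by name: the statement is the Claim_ definition above) =====
theorem compute1_spec : Claim_equal_compute1 := by
  intro limit _
  unfold Spec_compute1
  by_cases hlim : limit < 4
  · unfold compute1 compute1_alt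
    rw [if_pos hlim]
    have h4 : PySem.Int.floordiv limit 4 + 1 ≤ 1 := by
      rw [PySem.Int.floordiv_eq_ediv_of_pos (by norm_num : (0 : Int) < 4)]
      omega
    rw [PySem.List.pyRange_one_eq_nil h4]
    rfl
  · rw [not_lt] at hlim
    obtain ⟨n, rfl⟩ : ∃ n : Nat, (n : Int) = limit := ⟨limit.toNat, Int.toNat_of_nonneg (by omega)⟩
    have hn : 4 ≤ n := by exact_mod_cast hlim
    unfold compute1 compute1_alt
    rw [if_neg (by rw [not_lt]; exact_mod_cast hlim)]
    have hdiv : PySem.Int.floordiv (n : Int) 4 = ((n / 4 : Nat) : Int) := by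
      exact_mod_cast PySem.Int.floordiv_natCast n 4
    rw [hdiv, show ((n / 4 : Nat) : Int) + 1 = ((n / 4 + 1 : Nat) : Int) from by push_cast; ring]
    have hpr := pv_pyRange_cast 1 (n / 4 + 1)
    rw [Nat.cast_one] at hpr
    rw [hpr, show n / 4 + 1 - 1 = n / 4 from by omega, List.foldl_map]
    simp only [Int.toNat_natCast]
    have hA : ∀ (t : Int) (x : Nat), x ∈ List.range' 1 (n / 4) →
        yLoopA (n : Int) (x : Int) (PySem.List.pyRange 1 (pvYmax (n : Int) (x : Int) + 1) 1) t
          = t + ((List.range' 1 (Nat.sqrt ((n - 1) / x))).map (fun y =>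
              ((((List.range' (y + 1) (Nat.sqrt ((n - 1) / x) - y)).map (fun z => gC x z y)).sum : Nat) : Int))).sum := by
      intro t x hx
      rw [List.mem_range'_1] at hx
      have hx1 : 0 < x := hx.1
      rw [pv_pvYmax n x hn,
        show ((Nat.sqrt ((n - 1) / x) : Nat) : Int) + 1 = ((Nat.sqrt ((n - 1) / x) + 1 : Nat) : Int) from by push_cast; ring]
      have hpr2 := pv_pyRange_cast 1 (Nat.sqrt ((n - 1) / x) + 1)
      rw [Nat.cast_one] at hpr2
      rw [hpr2, show Nat.sqrt ((n - 1) / x) + 1 - 1 = Nat.sqrt ((n - 1) / x) from by omega]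
      exact pv_yLoopA_sum n x _ hx1
        (fun y hy => by rw [List.mem_range'_1] at hy; exact ⟨hy.1, by omega⟩) hn t
    refine Eq.trans (pv_foldl_eq_add_sum_int _ _ _ (fun t x hx => hA t x hx) 0) ?_
    refine Eq.trans ?_ (congrArg Nat.cast (pv_foldl_eq_add_sum_nat _ _ _
      (fun t x hx => pv_B_perx n x (by rw [List.mem_range'_1] at hx; exact hx.1) hn t) 0)).symm
    rw [zero_add, Nat.zero_add, Nat.cast_list_sum, List.map_map]
    refine congrArg List.sum (List.map_congr_left fun x hx => ?_)
    simp only [Function.comp]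
    rw [pv_cast_sum]
    exact_mod_cast pv_swap (Nat.sqrt ((n - 1) / x)) (fun y z => gC x z y)
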